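-- pv_equiv track=rewrite | github.com/Rage-ops/Algorithm-on-Graphs | week2_graph_decomposition2/3_intersection_reachability/strongly_connected.py | order_explore
-- ===== SOURCE A (Python) =====
-- def order_explore(adj, visited, x, pre, post, clock):
--     visited[x] = True
--     clock += 1
--     pre[x][0] = clock
--     for w in adj[x]:
--         if not visited[w]:
--             clock = order_explore(adj, visited, w, pre, post, clock)
--     clock += 1
--     post[x][0] = clock
--     return clock
-- ===== SOURCE B (Python) =====
-- def order_explore(adj, visited, x, pre, post, clock):
--     visited[x] = True
--     clock += 1
--     pre[x][0] = clock
--     stack = [(x, 0)]  # frame: (vertex, index of next neighbor to look at)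
--     while stack:
--         v, i = stack[-1]
--         if i < len(adj[v]):
--             stack[-1] = (v, i + 1)
--             w = adj[v][i]
--             if not visited[w]:
--                 visited[w] = True
--                 clock += 1
--                 pre[w][0] = clock
--                 stack.append((w, 0))
--         else:
--             stack.pop()
--             clock += 1
--             post[v][0] = clock
--     return clock
-- ===== Notes on version B (the rewrite author's own statement) =====
-- stated objective: alternative
-- what changed: A's recursive DFS is replaced by an iterative DFS driving an explicit stack of (vertex, next-neighbor-index) frames, marking and timestamping at push/pop time, so no Python recursion (and no recursion limit) is involved.
import Mathlib
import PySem

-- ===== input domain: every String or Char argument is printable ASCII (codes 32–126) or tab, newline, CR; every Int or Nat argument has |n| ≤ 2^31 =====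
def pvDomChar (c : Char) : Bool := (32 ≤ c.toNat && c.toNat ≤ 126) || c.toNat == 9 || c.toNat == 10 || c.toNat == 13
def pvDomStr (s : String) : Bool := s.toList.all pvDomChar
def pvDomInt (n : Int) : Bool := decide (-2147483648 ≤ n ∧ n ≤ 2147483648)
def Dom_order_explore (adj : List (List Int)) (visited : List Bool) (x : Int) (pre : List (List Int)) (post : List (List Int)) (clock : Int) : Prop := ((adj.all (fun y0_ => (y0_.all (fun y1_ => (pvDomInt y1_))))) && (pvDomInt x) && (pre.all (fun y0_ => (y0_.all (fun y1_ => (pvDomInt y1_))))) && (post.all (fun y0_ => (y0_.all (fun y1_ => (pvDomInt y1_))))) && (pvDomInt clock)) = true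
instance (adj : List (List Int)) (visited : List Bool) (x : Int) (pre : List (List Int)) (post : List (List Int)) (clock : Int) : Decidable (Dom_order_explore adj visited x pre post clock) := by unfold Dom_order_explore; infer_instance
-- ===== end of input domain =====

-- B replaces A's recursion by an explicit stack of (vertex, next-neighbor-index) frames; same
-- return value and same in-place effects on visited/pre/post; the theorems below are about the
-- returned clock (the mutations are Python side effects outside the Lean signature).

-- ===== PORT A =====

-- the mutable state A threads through the recursion: (visited, pre, post, clock)
structure PvSt where
  vis : List Bool
  pr : List (List Int)
  po : List (List Int)
  c : Int

-- Python list index normalization: a negative index counts from the end (exact for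
-- -n <= i < n, the only indices Pre_ admits)
def pvIdx (i : Int) (n : Nat) : Nat := if i < 0 then (i + n).toNat else i.toNat

-- `l[i][0] = v` (in-range and nonempty on Pre_, like Python)
def pvSetF (l : List (List Int)) (i : Nat) (v : Int) : List (List Int) :=
  l.set i ((l.getD i []).set 0 v)

-- literal recursion of A; the fuel only makes it total (depth ≤ |visited| on Pre_)
mutual
def pvGoA (adj : List (List Int)) : Nat → PvSt → Int → PvSt
  | 0, st, _ => st
  | f+1, st, x =>
      let st1 : PvSt := ⟨st.vis.set (pvIdx x st.vis.length) true,
        pvSetF st.pr (pvIdx x st.pr.length) (st.c+1), st.po, st.c+1⟩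
      let st2 := pvLoopA adj f (adj.getD (pvIdx x adj.length) []) st1
      ⟨st2.vis, st2.pr, pvSetF st2.po (pvIdx x st2.po.length) (st2.c+1), st2.c+1⟩
  termination_by f _ _ => (f, 0)

def pvLoopA (adj : List (List Int)) : Nat → List Int → PvSt → PvSt
  | _, [], st => st
  | f, w :: ws, st =>
      pvLoopA adj f ws (if st.vis.getD (pvIdx w st.vis.length) false then st else pvGoA adj f st w)
  termination_by f ws _ => (f, ws.length + 1)
end

def order_explore (adj : List (List Int)) (visited : List Bool) (x : Int) (pre : List (List Int)) (post : List (List Int)) (clock : Int) : Int :=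
  (pvGoA adj (visited.length + 1) ⟨visited, pre, post, clock⟩ x).c

-- ===== PORT B =====

-- literal transcription of Source B's while loop over the explicit frame stack; the fuel only
-- makes the loop total (on Pre_ the loop runs at most (|visited|+1)·(Σ|adj[v]|+2) times)
def pvGoB (adj : List (List Int)) : Nat → List (Int × Int) → PvSt → PvSt
  | 0, _, st => st
  | _+1, [], st => st
  | f+1, (v, i) :: rest, st =>
      let ns := adj.getD (pvIdx v adj.length) []
      if i < (ns.length : Int) then
        let w := ns.getD i.toNat 0
        if st.vis.getD (pvIdx w st.vis.length) false then
          pvGoB adj f ((v, i+1) :: rest) st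
        else
          pvGoB adj f ((w, 0) :: (v, i+1) :: rest)
            ⟨st.vis.set (pvIdx w st.vis.length) true,
              pvSetF st.pr (pvIdx w st.pr.length) (st.c+1), st.po, st.c+1⟩
      else
        pvGoB adj f rest ⟨st.vis, st.pr, pvSetF st.po (pvIdx v st.po.length) (st.c+1), st.c+1⟩

def order_explore_alt (adj : List (List Int)) (visited : List Bool) (x : Int) (pre : List (List Int)) (post : List (List Int)) (clock : Int) : Int :=
  let st : PvSt := ⟨visited.set (pvIdx x visited.length) true,
    pvSetF pre (pvIdx x pre.length) (clock+1), post, clock+1⟩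
  (pvGoB adj ((visited.length + 1) * ((adj.map List.length).sum + 2)) [(x, 0)] st).c

-- ===== PRECONDITION & SPEC =====
-- Pre_ admits (a) well-formed graphs with nonnegative in-range vertices and lists long
-- enough, (b) well-formed graphs with all four lists of equal length whose vertex indices
-- may also be negative (Python wraparound is then consistent across the lists), both with
-- nonempty pre/post rows, and (c) arbitrary ragged inputs whose start row leads only to
-- already-visited vertices, so no recursion happens; it excludes inputs whose deeper
-- indexing is only accidentally safe because of unreachability or inconsistent wraparound —
-- there A may raise IndexError or its value rests on those accidents.
def Pre_order_explore (adj : List (List Int)) (visited : List Bool) (x : Int) (pre : List (List Int)) (post : List (List Int)) (clock : Int) : Prop :=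
  (0 ≤ x ∧ x.toNat < adj.length ∧
   adj.length ≤ visited.length ∧ adj.length ≤ pre.length ∧ adj.length ≤ post.length ∧
   (∀ row ∈ adj, ∀ w ∈ row, 0 ≤ w ∧ w.toNat < adj.length) ∧
   (∀ r ∈ pre.take adj.length, r ≠ []) ∧ (∀ r ∈ post.take adj.length, r ≠ []))
  ∨
  (visited.length = adj.length ∧ pre.length = adj.length ∧ post.length = adj.length ∧
   -(adj.length : Int) ≤ x ∧ x < (adj.length : Int) ∧
   (∀ row ∈ adj, ∀ w ∈ row, -(adj.length : Int) ≤ w ∧ w < (adj.length : Int)) ∧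
   (∀ r ∈ pre, r ≠ []) ∧ (∀ r ∈ post, r ≠ []))
  ∨
  (-(adj.length : Int) ≤ x ∧ x < (adj.length : Int) ∧
   -(visited.length : Int) ≤ x ∧ x < (visited.length : Int) ∧
   -(pre.length : Int) ≤ x ∧ x < (pre.length : Int) ∧
   -(post.length : Int) ≤ x ∧ x < (post.length : Int) ∧
   pre.getD (pvIdx x pre.length) [] ≠ [] ∧ post.getD (pvIdx x post.length) [] ≠ [] ∧
   (∀ w ∈ adj.getD (pvIdx x adj.length) [],
     -(visited.length : Int) ≤ w ∧ w < (visited.length : Int) ∧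
     visited.getD (pvIdx w visited.length) false = true))
instance (adj : List (List Int)) (visited : List Bool) (x : Int) (pre : List (List Int)) (post : List (List Int)) (clock : Int) : Decidable (Pre_order_explore adj visited x pre post clock) := by unfold Pre_order_explore; infer_instance

def pvWitness_order_explore : List (List Int) × List Bool × Int × List (List Int) × List (List Int) × Int :=
  ([[1], [0]], [false, false], 0, [[0], [0]], [[0], [0]], 0)

def Spec_order_explore (adj : List (List Int)) (visited : List Bool) (x : Int) (pre : List (List Int)) (post : List (List Int)) (clock : Int) (out : Int) : Prop := out = order_explore_alt adj visited x pre post clock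
instance (adj : List (List Int)) (visited : List Bool) (x : Int) (pre : List (List Int)) (post : List (List Int)) (clock : Int) (out : Int) : Decidable (Spec_order_explore adj visited x pre post clock out) := by unfold Spec_order_explore; infer_instance

-- ===== CLAIM (what is proved, stated in full; the proofs are below) =====
def Claim_equal_order_explore : Prop := ∀ (adj : List (List Int)) (visited : List Bool) (x : Int) (pre : List (List Int)) (post : List (List Int)) (clock : Int), Dom_order_explore adj visited x pre post clock → Pre_order_explore adj visited x pre post clock → Spec_order_explore adj visited x pre post clock (order_explore adj visited x pre post clock)

-- ===== LEMMAS AND PROOFS =====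

-- entry actions of a call explore(x) (mark, tick, stamp pre) and its exit actions (tick, stamp post)
def pvEnter (st : PvSt) (x : Int) : PvSt :=
  ⟨st.vis.set (pvIdx x st.vis.length) true, pvSetF st.pr (pvIdx x st.pr.length) (st.c+1),
    st.po, st.c+1⟩
def pvPop (x : Int) (st : PvSt) : PvSt :=
  ⟨st.vis, st.pr, pvSetF st.po (pvIdx x st.po.length) (st.c+1), st.c+1⟩

theorem pvGoA_succ (adj : List (List Int)) (f : Nat) (st : PvSt) (x : Int) :
    pvGoA adj (f+1) st x = pvPop x (pvLoopA adj f (adj.getD (pvIdx x adj.length) []) (pvEnter st x)) := by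
  simp [pvGoA, pvEnter, pvPop]

theorem pvGoB_nil (adj : List (List Int)) (g : Nat) (st : PvSt) :
    pvGoB adj g [] st = st := by
  cases g <;> simp [pvGoB]

-- "only turns entries to true": pointwise monotone marking
def PvMono (a b : List Bool) : Prop := List.Forall₂ (fun p q => p = true → q = true) a b

theorem pvMono_refl (l : List Bool) : PvMono l l := by
  induction l with
  | nil => exact List.Forall₂.nil
  | cons h t ih => exact List.Forall₂.cons (fun h => h) ih

theorem pvMono_trans {a b c : List Bool} (h1 : PvMono a b) (h2 : PvMono b c) : PvMono a c := by
  induction h1 generalizing c with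
  | nil => exact h2
  | cons hpq _ ih =>
      cases h2 with
      | cons hqr hrest => exact List.Forall₂.cons (fun h => hqr (hpq h)) (ih hrest)

theorem pvMono_length {a b : List Bool} (h : PvMono a b) : a.length = b.length :=
  List.Forall₂.length_eq h

theorem pvMono_count {a b : List Bool} (h : PvMono a b) : b.count false ≤ a.count false := by
  induction h with
  | nil => simp
  | @cons p q ta tb hpq _ ih =>
      cases p <;> cases q <;> simp_all [List.count_cons] <;> omega

theorem pvMono_set (l : List Bool) (i : Nat) : PvMono l (l.set i true) := by
  induction l generalizing i with
  | nil => exact List.Forall₂.nil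
  | cons h t ih =>
      cases i with
      | zero => exact List.Forall₂.cons (fun _ => rfl) (pvMono_refl t)
      | succ j => exact List.Forall₂.cons (fun h => h) (ih j)

-- marking an unvisited in-range vertex lowers the false-count by one
theorem pvCount_set_false (l : List Bool) (i : Nat) (h : i < l.length)
    (hf : l.getD i false = false) : (l.set i true).count false + 1 = l.count false := by
  induction l generalizing i with
  | nil => simp at h
  | cons hd t ih =>
      cases i with
      | zero =>
          simp [List.getD] at hf
          subst hf
          simp [List.count_cons]
      | succ j =>
          simp at h
          simp [List.getD] at hf
          have := ih j h (by simpa [List.getD] using hf)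
          simp only [List.set_cons_succ, List.count_cons]
          simp only [List.count_cons] at this
          omega

-- a list with a true entry has fewer than length-many false entries
theorem pvCount_lt (l : List Bool) (i : Nat) (h : i < l.length)
    (ht : l.getD i false = true) : l.count false < l.length := by
  induction l generalizing i with
  | nil => simp at h
  | cons hd t ih =>
      cases i with
      | zero =>
          simp [List.getD] at ht
          subst ht
          have := List.count_le_length (l := t) (a := false)
          simp
          omega
      | succ j =>
          simp at h
          have := ih j h (by simpa [List.getD] using ht)
          have h2 : (if hd = false then 1 else 0) ≤ 1 := by split <;> omega
          simp [List.count_cons]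
          split <;> omega

theorem pvGetD_set_self (l : List Bool) (i : Nat) (h : i < l.length) :
    (l.set i true).getD i false = true := by
  induction l generalizing i with
  | nil => simp at h
  | cons hd t ih =>
      cases i with
      | zero => rfl
      | succ j => simpa [List.getD] using ih j (by simpa using h)

theorem pvIdx_nonneg (i : Int) (n : Nat) (h : 0 ≤ i) : pvIdx i n = i.toNat := by
  unfold pvIdx
  rw [if_neg (by omega)]

theorem pvIdx_lt (i : Int) (n : Nat) (h1 : -(n : Int) ≤ i) (h2 : i < (n : Int)) :
    pvIdx i n < n := by
  unfold pvIdx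
  split <;> omega

-- setting an entry to true never turns a true read into a false one
theorem pvGetD_set_true (l : List Bool) (i j : Nat) (h : l.getD j false = true) :
    (l.set i true).getD j false = true := by
  induction l generalizing i j with
  | nil => simpa using h
  | cons hd t ih =>
      cases i with
      | zero =>
          cases j with
          | zero => rfl
          | succ k => simpa [List.getD] using h
      | succ i' =>
          cases j with
          | zero => simpa [List.getD] using h
          | succ k => simpa [List.getD] using ih i' k (by simpa [List.getD] using h)

-- any row getD-ed out of adj is no longer than the total row-length sum
theorem pvRowLen (adj : List (List Int)) (j : Nat) :
    (adj.getD j []).length ≤ (adj.map List.length).sum := by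
  induction adj generalizing j with
  | nil => simp [List.getD]
  | cons a l ih =>
      cases j with
      | zero => simp [List.getD]
      | succ k =>
          have := ih k
          simp [List.getD] at this ⊢
          omega

theorem pvRow_mem (adj : List (List Int)) (j : Nat) :
    adj.getD j [] = [] ∨ adj.getD j [] ∈ adj := by
  induction adj generalizing j with
  | nil => left; simp [List.getD]
  | cons a l ih =>
      cases j with
      | zero => right; simp [List.getD]
      | succ k =>
          rcases ih k with h | h
          · left; simpa [List.getD] using h
          · right; simp [List.getD]; right; simpa using h

-- A's recursion only marks vertices (never unmarks); in particular lengths are kept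
theorem pvLoopA_pres (adj : List (List Int)) (f : Nat)
    (hgo : ∀ st x, PvMono st.vis (pvGoA adj f st x).vis) :
    ∀ ws st, PvMono st.vis (pvLoopA adj f ws st).vis := by
  intro ws
  induction ws with
  | nil => intro st; simpa [pvLoopA] using pvMono_refl _
  | cons w ws ih =>
      intro st
      have hstep : PvMono st.vis (if st.vis.getD (pvIdx w st.vis.length) false then st else pvGoA adj f st w).vis := by
        split
        · exact pvMono_refl _
        · exact hgo st w
      simpa [pvLoopA] using pvMono_trans hstep (ih _)

theorem pvGoA_pres (adj : List (List Int)) :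
    ∀ f st x, PvMono st.vis (pvGoA adj f st x).vis := by
  intro f
  induction f with
  | zero => intro st x; simpa [pvGoA] using pvMono_refl _
  | succ f ih =>
      intro st x
      rw [pvGoA_succ]
      have h2 := pvLoopA_pres adj f ih (adj.getD (pvIdx x adj.length) []) (pvEnter st x)
      have h1 : PvMono st.vis (pvEnter st x).vis := pvMono_set _ _
      exact pvMono_trans h1 (by simpa [pvPop] using h2)

-- the simulation: one explicit-stack frame (x, i) of B, run to its pop, performs exactly the
-- rest of A's explore(x) (remaining neighbors from index i, then the post stamp), for any
-- sufficient fuels; fuel consumption is accounted against newly marked vertices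
theorem pvSim (adj : List (List Int)) (V : Nat)
    (hG : ∀ row ∈ adj, ∀ w ∈ row, pvIdx w V < V) :
    ∀ f : Nat, ∀ (st : PvSt) (x : Int) (i : Nat) (rest : List (Int × Int)) (fA : Nat),
    st.vis.length = V →
    i ≤ (adj.getD (pvIdx x adj.length) []).length →
    st.vis.count false + 1 ≤ fA →
    ((adj.getD (pvIdx x adj.length) []).length - i) + 1
        + st.vis.count false * ((adj.map List.length).sum + 2) ≤ f →
    ∃ g : Nat,
      pvGoB adj f ((x, (i : Int)) :: rest) st
        = pvGoB adj g rest (pvPop x (pvLoopA adj fA ((adj.getD (pvIdx x adj.length) []).drop i) st))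
      ∧ g < f
      ∧ f ≤ g + (((adj.getD (pvIdx x adj.length) []).length - i) + 1
          + (st.vis.count false - (pvLoopA adj fA ((adj.getD (pvIdx x adj.length) []).drop i) st).vis.count false)
            * ((adj.map List.length).sum + 2)) := by
  intro f
  induction f using Nat.strong_induction_on with
  | _ f IH =>
  intro st x i rest fA hlen h2 h3 h4
  obtain ⟨f', rfl⟩ : ∃ f', f = f' + 1 := ⟨f - 1, by omega⟩
  by_cases hi : i < (adj.getD (pvIdx x adj.length) []).length
  · -- frame still has neighbors to scan
    have hcast : ((i : Int) < ((adj.getD (pvIdx x adj.length) []).length : Int)) := by exact_mod_cast hi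
    have hne : adj.getD (pvIdx x adj.length) [] ≠ [] := by
      intro h0; rw [h0] at hi; simp at hi
    have hnsmem : adj.getD (pvIdx x adj.length) [] ∈ adj := by
      rcases pvRow_mem adj (pvIdx x adj.length) with h | h
      · exact absurd h hne
      · exact h
    have hwget : (adj.getD (pvIdx x adj.length) []).getD i 0 = (adj.getD (pvIdx x adj.length) [])[i] :=
      List.getD_eq_getElem _ _ hi
    have hwmem : (adj.getD (pvIdx x adj.length) [])[i] ∈ adj.getD (pvIdx x adj.length) [] := List.getElem_mem hi
    have hwVidx := hG _ hnsmem _ hwmem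
    have hdrop : (adj.getD (pvIdx x adj.length) []).drop i
        = (adj.getD (pvIdx x adj.length) [])[i] :: (adj.getD (pvIdx x adj.length) []).drop (i+1) :=
      (List.getElem_cons_drop hi).symm
    have hBstep : pvGoB adj (f'+1) ((x, (i : Int)) :: rest) st
        = if st.vis.getD (pvIdx ((adj.getD (pvIdx x adj.length) [])[i]) st.vis.length) false
          then pvGoB adj f' ((x, (i:Int)+1) :: rest) st
          else pvGoB adj f' (((adj.getD (pvIdx x adj.length) [])[i], 0) :: (x, (i:Int)+1) :: rest)
            (pvEnter st ((adj.getD (pvIdx x adj.length) [])[i])) := by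
      simp only [pvGoB]
      rw [if_pos hcast]
      simp only [pvEnter, Int.toNat_natCast]
      rw [hwget]
    have hLoop : pvLoopA adj fA ((adj.getD (pvIdx x adj.length) []).drop i) st
        = pvLoopA adj fA ((adj.getD (pvIdx x adj.length) []).drop (i+1))
            (if st.vis.getD (pvIdx ((adj.getD (pvIdx x adj.length) [])[i]) st.vis.length) false then st
             else pvGoA adj fA st ((adj.getD (pvIdx x adj.length) [])[i])) := by
      rw [hdrop, pvLoopA]
    have hcast1 : ((i : Int) + 1) = (((i+1 : Nat)) : Int) := by push_cast; ring
    by_cases hv : st.vis.getD (pvIdx ((adj.getD (pvIdx x adj.length) [])[i]) st.vis.length) false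
    · -- neighbor already visited: skip
      rw [if_pos hv] at hBstep hLoop
      obtain ⟨g, heq, hlt, hbnd⟩ := IH f' (by omega) st x (i+1) rest fA hlen (by omega) h3
        (by
          generalize st.vis.count false * ((adj.map List.length).sum + 2) = P at h4 ⊢
          omega)
      refine ⟨g, ?_, by omega, ?_⟩
      · rw [hBstep, hcast1, heq, hLoop]
      · rw [hLoop]
        generalize (st.vis.count false
          - (pvLoopA adj fA ((adj.getD (pvIdx x adj.length) []).drop (i+1)) st).vis.count false)
          * ((adj.map List.length).sum + 2) = Q at hbnd ⊢
        omega
    · -- unvisited neighbor: push it (B) / recurse into it (A)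
      rw [if_neg hv] at hBstep hLoop
      have hv' : st.vis.getD (pvIdx ((adj.getD (pvIdx x adj.length) [])[i]) st.vis.length) false = false := by
        simpa using hv
      have hwlen : pvIdx ((adj.getD (pvIdx x adj.length) [])[i]) st.vis.length
          < st.vis.length := by
        rw [hlen]; exact hwVidx
      have hfcE : (pvEnter st ((adj.getD (pvIdx x adj.length) [])[i])).vis.count false + 1
          = st.vis.count false := pvCount_set_false _ _ hwlen hv'
      have hlenE : (pvEnter st ((adj.getD (pvIdx x adj.length) [])[i])).vis.length = V := by
        simp [pvEnter, hlen]
      have hfA1 : fA = (fA - 1) + 1 := by omega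
      have hRowW : (adj.getD (pvIdx ((adj.getD (pvIdx x adj.length) [])[i]) adj.length) []).length
          ≤ (adj.map List.length).sum := pvRowLen adj _
      -- child frame: B runs the pushed frame to its pop = A's explore of the neighbor
      obtain ⟨g₁, heq1, hlt1, hbnd1⟩ := IH f' (by omega)
        (pvEnter st ((adj.getD (pvIdx x adj.length) [])[i])) ((adj.getD (pvIdx x adj.length) [])[i]) 0
        ((x, ((i+1:Nat) : Int)) :: rest) (fA - 1) hlenE (Nat.zero_le _) (by omega)
        (by
          have hmul : st.vis.count false * ((adj.map List.length).sum + 2)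
              = (pvEnter st ((adj.getD (pvIdx x adj.length) [])[i])).vis.count false
                  * ((adj.map List.length).sum + 2) + ((adj.map List.length).sum + 2) := by
            rw [← hfcE, Nat.succ_mul]
          generalize hA : (pvEnter st ((adj.getD (pvIdx x adj.length) [])[i])).vis.count false
            * ((adj.map List.length).sum + 2) = a at hmul ⊢
          generalize hB : st.vis.count false * ((adj.map List.length).sum + 2) = b at hmul h4
          omega)
      rw [List.drop_zero] at heq1 hbnd1
      simp only [Nat.cast_zero] at heq1
      have hC : pvPop ((adj.getD (pvIdx x adj.length) [])[i])
          (pvLoopA adj (fA - 1) (adj.getD (pvIdx ((adj.getD (pvIdx x adj.length) [])[i]) adj.length) [])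
            (pvEnter st ((adj.getD (pvIdx x adj.length) [])[i])))
          = pvGoA adj fA st ((adj.getD (pvIdx x adj.length) [])[i]) := by
        conv_rhs => rw [hfA1]
        rw [pvGoA_succ]
      have hveq : (pvGoA adj fA st ((adj.getD (pvIdx x adj.length) [])[i])).vis
          = (pvLoopA adj (fA - 1) (adj.getD (pvIdx ((adj.getD (pvIdx x adj.length) [])[i]) adj.length) [])
              (pvEnter st ((adj.getD (pvIdx x adj.length) [])[i]))).vis := by
        rw [← hC]; simp [pvPop]
      rw [hC] at heq1
      rw [← hveq] at hbnd1
      -- facts about the state after the child's subtree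
      have hMonoC : PvMono (pvEnter st ((adj.getD (pvIdx x adj.length) [])[i])).vis
          (pvGoA adj fA st ((adj.getD (pvIdx x adj.length) [])[i])).vis := by
        have hM := pvLoopA_pres adj (fA - 1) (pvGoA_pres adj (fA - 1))
          (adj.getD (pvIdx ((adj.getD (pvIdx x adj.length) [])[i]) adj.length) []) (pvEnter st ((adj.getD (pvIdx x adj.length) [])[i]))
        rw [← hC]
        simpa [pvPop] using hM
      have hfcC : (pvGoA adj fA st ((adj.getD (pvIdx x adj.length) [])[i])).vis.count false
          ≤ (pvEnter st ((adj.getD (pvIdx x adj.length) [])[i])).vis.count false := pvMono_count hMonoC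
      have hlenC : (pvGoA adj fA st ((adj.getD (pvIdx x adj.length) [])[i])).vis.length = V := by
        rw [← pvMono_length hMonoC, hlenE]
      -- parent frame resumes at index i+1 in the post-subtree state
      obtain ⟨g₂, heq2, hlt2, hbnd2⟩ := IH g₁ (by omega)
        (pvGoA adj fA st ((adj.getD (pvIdx x adj.length) [])[i])) x (i+1) rest fA hlenC (by omega)
        (by omega)
        (by
          have hsub : ((pvEnter st ((adj.getD (pvIdx x adj.length) [])[i])).vis.count false
              - (pvGoA adj fA st ((adj.getD (pvIdx x adj.length) [])[i])).vis.count false)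
              * ((adj.map List.length).sum + 2)
            = (pvEnter st ((adj.getD (pvIdx x adj.length) [])[i])).vis.count false
                * ((adj.map List.length).sum + 2)
              - (pvGoA adj fA st ((adj.getD (pvIdx x adj.length) [])[i])).vis.count false
                * ((adj.map List.length).sum + 2) := Nat.sub_mul _ _ _
          have hab : (pvGoA adj fA st ((adj.getD (pvIdx x adj.length) [])[i])).vis.count false
              * ((adj.map List.length).sum + 2)
            ≤ (pvEnter st ((adj.getD (pvIdx x adj.length) [])[i])).vis.count false
              * ((adj.map List.length).sum + 2) := mul_le_mul_right' hfcC _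
          have hmul : st.vis.count false * ((adj.map List.length).sum + 2)
              = (pvEnter st ((adj.getD (pvIdx x adj.length) [])[i])).vis.count false
                  * ((adj.map List.length).sum + 2) + ((adj.map List.length).sum + 2) := by
            rw [← hfcE, Nat.succ_mul]
          generalize (pvGoA adj fA st ((adj.getD (pvIdx x adj.length) [])[i])).vis.count false
            * ((adj.map List.length).sum + 2) = a at hsub hab hbnd1 ⊢
          generalize (pvEnter st ((adj.getD (pvIdx x adj.length) [])[i])).vis.count false
            * ((adj.map List.length).sum + 2) = b at hsub hab hmul hbnd1 ⊢
          generalize st.vis.count false * ((adj.map List.length).sum + 2) = d at hmul h4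
          omega)
      refine ⟨g₂, ?_, by omega, ?_⟩
      · rw [hBstep, hcast1, heq1, heq2, hLoop]
      · rw [hLoop]
        have hMonoT : PvMono (pvGoA adj fA st ((adj.getD (pvIdx x adj.length) [])[i])).vis
            (pvLoopA adj fA ((adj.getD (pvIdx x adj.length) []).drop (i+1))
              (pvGoA adj fA st ((adj.getD (pvIdx x adj.length) [])[i]))).vis :=
          pvLoopA_pres adj fA (pvGoA_pres adj fA) _ _
        have hfcT : (pvLoopA adj fA ((adj.getD (pvIdx x adj.length) []).drop (i+1))
              (pvGoA adj fA st ((adj.getD (pvIdx x adj.length) [])[i]))).vis.count false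
            ≤ (pvGoA adj fA st ((adj.getD (pvIdx x adj.length) [])[i])).vis.count false :=
          pvMono_count hMonoT
        have hsub1 : ((pvEnter st ((adj.getD (pvIdx x adj.length) [])[i])).vis.count false
            - (pvGoA adj fA st ((adj.getD (pvIdx x adj.length) [])[i])).vis.count false)
            * ((adj.map List.length).sum + 2)
          = (pvEnter st ((adj.getD (pvIdx x adj.length) [])[i])).vis.count false
              * ((adj.map List.length).sum + 2)
            - (pvGoA adj fA st ((adj.getD (pvIdx x adj.length) [])[i])).vis.count false
              * ((adj.map List.length).sum + 2) := Nat.sub_mul _ _ _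
        have hsub2 : ((pvGoA adj fA st ((adj.getD (pvIdx x adj.length) [])[i])).vis.count false
            - (pvLoopA adj fA ((adj.getD (pvIdx x adj.length) []).drop (i+1))
                (pvGoA adj fA st ((adj.getD (pvIdx x adj.length) [])[i]))).vis.count false)
            * ((adj.map List.length).sum + 2)
          = (pvGoA adj fA st ((adj.getD (pvIdx x adj.length) [])[i])).vis.count false
              * ((adj.map List.length).sum + 2)
            - (pvLoopA adj fA ((adj.getD (pvIdx x adj.length) []).drop (i+1))
                (pvGoA adj fA st ((adj.getD (pvIdx x adj.length) [])[i]))).vis.count false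
              * ((adj.map List.length).sum + 2) := Nat.sub_mul _ _ _
        have hsub3 : (st.vis.count false
            - (pvLoopA adj fA ((adj.getD (pvIdx x adj.length) []).drop (i+1))
                (pvGoA adj fA st ((adj.getD (pvIdx x adj.length) [])[i]))).vis.count false)
            * ((adj.map List.length).sum + 2)
          = st.vis.count false * ((adj.map List.length).sum + 2)
            - (pvLoopA adj fA ((adj.getD (pvIdx x adj.length) []).drop (i+1))
                (pvGoA adj fA st ((adj.getD (pvIdx x adj.length) [])[i]))).vis.count false
              * ((adj.map List.length).sum + 2) := Nat.sub_mul _ _ _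
        have hab : (pvGoA adj fA st ((adj.getD (pvIdx x adj.length) [])[i])).vis.count false
            * ((adj.map List.length).sum + 2)
          ≤ (pvEnter st ((adj.getD (pvIdx x adj.length) [])[i])).vis.count false
            * ((adj.map List.length).sum + 2) := mul_le_mul_right' hfcC _
        have het : (pvLoopA adj fA ((adj.getD (pvIdx x adj.length) []).drop (i+1))
              (pvGoA adj fA st ((adj.getD (pvIdx x adj.length) [])[i]))).vis.count false
              * ((adj.map List.length).sum + 2)
          ≤ (pvGoA adj fA st ((adj.getD (pvIdx x adj.length) [])[i])).vis.count false
              * ((adj.map List.length).sum + 2) := mul_le_mul_right' hfcT _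
        have hmul : st.vis.count false * ((adj.map List.length).sum + 2)
            = (pvEnter st ((adj.getD (pvIdx x adj.length) [])[i])).vis.count false
                * ((adj.map List.length).sum + 2) + ((adj.map List.length).sum + 2) := by
          rw [← hfcE, Nat.succ_mul]
        generalize (pvLoopA adj fA ((adj.getD (pvIdx x adj.length) []).drop (i+1))
            (pvGoA adj fA st ((adj.getD (pvIdx x adj.length) [])[i]))).vis.count false
          * ((adj.map List.length).sum + 2) = e at hsub2 hsub3 het hbnd2 ⊢
        generalize (pvGoA adj fA st ((adj.getD (pvIdx x adj.length) [])[i])).vis.count false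
          * ((adj.map List.length).sum + 2) = a at hsub1 hsub2 hab het hbnd1 hbnd2 ⊢
        generalize (pvEnter st ((adj.getD (pvIdx x adj.length) [])[i])).vis.count false
          * ((adj.map List.length).sum + 2) = b at hsub1 hab hmul hbnd1 ⊢
        generalize st.vis.count false * ((adj.map List.length).sum + 2) = d at hsub3 hmul h4 ⊢
        rw [hsub1] at hbnd1
        rw [hsub2] at hbnd2
        rw [hsub3]
        omega
  · -- index exhausted: B pops the frame = A's post stamp
    have hieq : i = (adj.getD (pvIdx x adj.length) []).length := by omega
    have hcast : ¬ ((i : Int) < ((adj.getD (pvIdx x adj.length) []).length : Int)) := by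
      exact_mod_cast hi
    have hdrop : (adj.getD (pvIdx x adj.length) []).drop i = [] :=
      List.drop_eq_nil_of_le (by omega)
    refine ⟨f', ?_, by omega, ?_⟩
    · rw [hdrop]
      simp [pvGoB, pvLoopA, pvPop]
      intro h
      exact absurd h hi
    · rw [hdrop]
      simp only [pvLoopA, Nat.sub_self, Nat.zero_mul]
      omega

-- if every listed neighbor is already visited, A's loop does nothing
theorem pvLoopA_skip (adj : List (List Int)) (f : Nat) :
    ∀ ws (st : PvSt), (∀ w ∈ ws, st.vis.getD (pvIdx w st.vis.length) false = true) →
    pvLoopA adj f ws st = st := by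
  intro ws
  induction ws with
  | nil => intro st _; simp [pvLoopA]
  | cons w ws ih =>
      intro st h
      have hw := h w (by simp)
      rw [pvLoopA, if_pos hw]
      exact ih st (fun u hu => h u (by simp [hu]))

-- if every neighbor of the start frame is already visited, B only advances the index
-- through the row and pops: the frame acts as A's (empty) loop plus the post stamp
theorem pvSimSkip (adj : List (List Int)) :
    ∀ f : Nat, ∀ (st : PvSt) (x : Int) (i : Nat) (rest : List (Int × Int)),
    (∀ w ∈ adj.getD (pvIdx x adj.length) [],
      st.vis.getD (pvIdx w st.vis.length) false = true) →
    i ≤ (adj.getD (pvIdx x adj.length) []).length →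
    (adj.getD (pvIdx x adj.length) []).length - i + 1 ≤ f →
    ∃ g : Nat, pvGoB adj f ((x, (i : Int)) :: rest) st = pvGoB adj g rest (pvPop x st) := by
  intro f
  induction f using Nat.strong_induction_on with
  | _ f IH =>
  intro st x i rest hskip h2 h4
  obtain ⟨f', rfl⟩ : ∃ f', f = f' + 1 := ⟨f - 1, by omega⟩
  by_cases hi : i < (adj.getD (pvIdx x adj.length) []).length
  · have hcast : ((i : Int) < ((adj.getD (pvIdx x adj.length) []).length : Int)) := by
      exact_mod_cast hi
    have hwget : (adj.getD (pvIdx x adj.length) []).getD i 0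
        = (adj.getD (pvIdx x adj.length) [])[i] := List.getD_eq_getElem _ _ hi
    have hv : st.vis.getD
        (pvIdx ((adj.getD (pvIdx x adj.length) [])[i]) st.vis.length) false = true :=
      hskip _ (List.getElem_mem hi)
    have hstep : pvGoB adj (f'+1) ((x, (i:Int)) :: rest) st
        = pvGoB adj f' ((x, (i:Int)+1) :: rest) st := by
      simp only [pvGoB]
      rw [if_pos hcast]
      simp only [Int.toNat_natCast]
      rw [hwget, if_pos hv]
    have hcast1 : ((i : Int) + 1) = (((i+1 : Nat)) : Int) := by push_cast; ring
    obtain ⟨g, hg⟩ := IH f' (by omega) st x (i+1) rest hskip (by omega) (by omega)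
    exact ⟨g, by rw [hstep, hcast1, hg]⟩
  · have hcast : ¬ ((i : Int) < ((adj.getD (pvIdx x adj.length) []).length : Int)) := by
      exact_mod_cast hi
    refine ⟨f', ?_⟩
    simp only [pvGoB]
    rw [if_neg hcast]
    rfl

-- common glue for both well-formed branches: run the simulation from the entry state
theorem pvEquivMain (adj : List (List Int)) (visited : List Bool) (x : Int)
    (pre : List (List Int)) (post : List (List Int)) (clock : Int)
    (hG : ∀ row ∈ adj, ∀ w ∈ row, pvIdx w visited.length < visited.length)
    (hxv : pvIdx x visited.length < visited.length) :
    (pvGoA adj (visited.length + 1) ⟨visited, pre, post, clock⟩ x).c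
      = (pvGoB adj ((visited.length + 1) * ((adj.map List.length).sum + 2)) [(x, 0)]
          (pvEnter ⟨visited, pre, post, clock⟩ x)).c := by
  have hrow : (adj.getD (pvIdx x adj.length) []).length ≤ (adj.map List.length).sum :=
    pvRowLen adj _
  have hlenE : (pvEnter ⟨visited, pre, post, clock⟩ x).vis.length = visited.length := by
    simp [pvEnter]
  have hfc : (pvEnter ⟨visited, pre, post, clock⟩ x).vis.count false + 1
      ≤ visited.length := by
    have := pvCount_lt (visited.set (pvIdx x visited.length) true) (pvIdx x visited.length)
      (by simpa using hxv)
      (pvGetD_set_self visited (pvIdx x visited.length) hxv)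
    simpa [pvEnter] using this
  obtain ⟨g, heq, _, _⟩ := pvSim adj visited.length hG
    ((visited.length + 1) * ((adj.map List.length).sum + 2))
    (pvEnter ⟨visited, pre, post, clock⟩ x) x 0 [] visited.length hlenE (Nat.zero_le _) hfc
    (by
      have hmul : ((pvEnter ⟨visited, pre, post, clock⟩ x).vis.count false + 1)
          * ((adj.map List.length).sum + 2)
        ≤ visited.length * ((adj.map List.length).sum + 2) := mul_le_mul_right' hfc _
      rw [Nat.succ_mul] at hmul
      have hmul2 : (visited.length + 1) * ((adj.map List.length).sum + 2)
          = visited.length * ((adj.map List.length).sum + 2)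
            + ((adj.map List.length).sum + 2) := Nat.succ_mul _ _
      generalize (pvEnter ⟨visited, pre, post, clock⟩ x).vis.count false
        * ((adj.map List.length).sum + 2) = a at hmul ⊢
      generalize visited.length * ((adj.map List.length).sum + 2) = b at hmul hmul2 ⊢
      omega)
  rw [List.drop_zero] at heq
  simp only [Nat.cast_zero] at heq
  rw [pvGoA_succ, heq, pvGoB_nil]

-- ===== VERDICT (by name: the statement is the Claim_ definition above) =====
theorem order_explore_spec : Claim_equal_order_explore := by
  intro adj visited x pre post clock _ hpre
  unfold Spec_order_explore order_explore order_explore_alt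
  show (pvGoA adj (visited.length + 1) ⟨visited, pre, post, clock⟩ x).c
      = (pvGoB adj ((visited.length + 1) * ((adj.map List.length).sum + 2)) [(x, 0)]
          (pvEnter ⟨visited, pre, post, clock⟩ x)).c
  rcases hpre with ⟨hx0, hxadj, hlv, _, _, hG, _, _⟩ |
    ⟨hveq, _, _, hx1, hx2, hG, _, _⟩ |
    ⟨_, _, hv1, hv2, _, _, _, _, _, _, hnb⟩
  · -- nonnegative in-range vertices
    refine pvEquivMain adj visited x pre post clock ?_ ?_
    · intro row hr w hw
      rw [pvIdx_nonneg _ _ (hG row hr w hw).1]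
      exact lt_of_lt_of_le (hG row hr w hw).2 hlv
    · rw [pvIdx_nonneg _ _ hx0]
      exact lt_of_lt_of_le hxadj hlv
  · -- equal lengths: negative indices wrap consistently
    refine pvEquivMain adj visited x pre post clock ?_ ?_
    · intro row hr w hw
      rw [hveq]
      exact pvIdx_lt _ _ (hG row hr w hw).1 (hG row hr w hw).2
    · rw [hveq]
      exact pvIdx_lt _ _ (by omega) (by omega)
  · -- ragged input, every neighbor of the start vertex already visited: no recursion
    have hlenE : (pvEnter ⟨visited, pre, post, clock⟩ x).vis.length = visited.length := by
      simp [pvEnter]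
    have hskip : ∀ w ∈ adj.getD (pvIdx x adj.length) [],
        (pvEnter ⟨visited, pre, post, clock⟩ x).vis.getD
          (pvIdx w (pvEnter ⟨visited, pre, post, clock⟩ x).vis.length) false = true := by
      intro w hw
      rw [hlenE]
      exact pvGetD_set_true _ _ _ (hnb w hw).2.2
    have hfuel : (adj.getD (pvIdx x adj.length) []).length - 0 + 1
        ≤ (visited.length + 1) * ((adj.map List.length).sum + 2) := by
      have hrow : (adj.getD (pvIdx x adj.length) []).length ≤ (adj.map List.length).sum :=
        pvRowLen adj _
      have h1 : (adj.map List.length).sum + 2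
          ≤ (visited.length + 1) * ((adj.map List.length).sum + 2) :=
        Nat.le_mul_of_pos_left _ (by omega)
      omega
    obtain ⟨g, heq⟩ := pvSimSkip adj
      ((visited.length + 1) * ((adj.map List.length).sum + 2))
      (pvEnter ⟨visited, pre, post, clock⟩ x) x 0 [] hskip (Nat.zero_le _) hfuel
    simp only [Nat.cast_zero] at heq
    rw [pvGoA_succ, pvLoopA_skip adj visited.length _ _ hskip, heq, pvGoB_nil]
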